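-- pv_equiv track=rewrite | github.com/roemmele/AbLit | scripts/dataset_creation/pack_final_dataset.py | check_span_is_valid
-- ===== SOURCE A (Python) =====
-- def check_span_is_valid(segs, start_char, end_char):
--     seg_end_chars = []
--     for seg in segs:
--         if not seg_end_chars:
--             seg_end_chars.append(len(seg))
--         else:
--             seg_end_chars.append(seg_end_chars[-1] + len(seg))
--
--     for seg_end_char in seg_end_chars:
--         if start_char >= seg_end_char:
--             continue
--         if start_char <= seg_end_char and end_char <= seg_end_char:
--             return True
--         if end_char > seg_end_char:
--             return False
--     return True
-- ===== SOURCE B (Python) =====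
-- def check_span_is_valid(segs, start_char, end_char):
--     ends = []
--     total = 0
--     for seg in segs:
--         total += len(seg)
--         ends.append(total)
--     # binary search: first index whose cumulative end exceeds start_char
--     lo, hi = 0, len(ends)
--     while lo < hi:
--         mid = (lo + hi) // 2
--         if ends[mid] <= start_char:
--             lo = mid + 1
--         else:
--             hi = mid
--     if lo == len(ends):
--         return True
--     return end_char <= ends[lo]
-- ===== Notes on version B (the rewrite author's own statement) =====
-- stated objective: alternative
-- what changed: B locates the first cumulative segment end exceeding start_char with a hand-written binary search over the monotone prefix-sum table instead of A's linear skip-and-test scan, and returns end_char <= that bound (True if none).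
import Mathlib
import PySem

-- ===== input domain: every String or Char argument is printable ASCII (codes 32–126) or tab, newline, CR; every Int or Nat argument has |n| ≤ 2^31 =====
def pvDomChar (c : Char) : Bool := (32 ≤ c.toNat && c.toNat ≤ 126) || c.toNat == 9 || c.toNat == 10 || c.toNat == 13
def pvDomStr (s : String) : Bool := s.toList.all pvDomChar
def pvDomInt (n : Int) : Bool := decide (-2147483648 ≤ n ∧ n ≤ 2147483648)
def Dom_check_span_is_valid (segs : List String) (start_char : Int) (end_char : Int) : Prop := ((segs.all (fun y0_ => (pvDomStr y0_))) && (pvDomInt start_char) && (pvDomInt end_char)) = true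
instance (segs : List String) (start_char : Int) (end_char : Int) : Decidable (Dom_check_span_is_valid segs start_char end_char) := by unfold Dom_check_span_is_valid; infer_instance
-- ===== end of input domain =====

-- B replaces A's linear scan of the cumulative-end table by a hand-written binary search
-- over that (monotone) table; same decision, different search strategy (alternative).

-- ===== PORT A =====
-- second loop of A: skip ends ≤ start_char; at the first larger one decide; fall through continues
def pvScanA : List Int → Int → Int → Bool
  | [], _, _ => true
  | e :: rest, start_char, end_char =>
    if start_char ≥ e then pvScanA rest start_char end_char
    else if start_char ≤ e ∧ end_char ≤ e then true
    else if end_char > e then false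
    else pvScanA rest start_char end_char

def check_span_is_valid (segs : List String) (start_char : Int) (end_char : Int) : Bool :=
  let seg_end_chars : List Int := segs.foldl (fun acc seg =>
    match acc.getLast? with
    | none => acc ++ [PySem.Str.len seg]
    | some last => acc ++ [last + PySem.Str.len seg]) []
  pvScanA seg_end_chars start_char end_char

-- ===== PORT B =====
-- first loop of B: running total, list of cumulative ends
def pvBuildEnds (segs : List String) : Int × List Int :=
  segs.foldl (fun st seg =>
    let total := st.1 + PySem.Str.len seg
    (total, st.2 ++ [total])) (0, [])

-- B's while loop (ends[mid] is always in range for lo < hi ≤ len; getD is exact there)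
def pvBsearch (ends : List Int) (s : Int) (lo hi : Nat) : Nat :=
  if _h : lo < hi then
    let mid := (lo + hi) / 2
    if ends.getD mid 0 ≤ s then pvBsearch ends s (mid + 1) hi
    else pvBsearch ends s lo mid
  else lo
termination_by hi - lo
decreasing_by
  · omega
  · omega

def check_span_is_valid_alt (segs : List String) (start_char : Int) (end_char : Int) : Bool :=
  let ends := (pvBuildEnds segs).2
  let lo := pvBsearch ends start_char 0 ends.length
  if lo = ends.length then true
  else decide (end_char ≤ ends.getD lo 0)

-- ===== PRECONDITION & SPEC =====
def Spec_check_span_is_valid (segs : List String) (start_char : Int) (end_char : Int) (out : Bool) : Prop := out = check_span_is_valid_alt segs start_char end_char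
instance (segs : List String) (start_char : Int) (end_char : Int) (out : Bool) : Decidable (Spec_check_span_is_valid segs start_char end_char out) := by unfold Spec_check_span_is_valid; infer_instance

-- ===== CLAIM (what is proved, stated in full; the proofs are below) =====
def Claim_equal_check_span_is_valid : Prop := ∀ (segs : List String) (start_char : Int) (end_char : Int), Dom_check_span_is_valid segs start_char end_char → Spec_check_span_is_valid segs start_char end_char (check_span_is_valid segs start_char end_char)

-- ===== LEMMAS AND PROOFS =====

-- A's table construction equals B's (the second component of the fold state)
theorem pv_build_eq (segs : List String) :
    ∀ (acc : List Int) (t : Int), acc.getLast?.getD 0 = t →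
    segs.foldl (fun acc seg =>
      match acc.getLast? with
      | none => acc ++ [PySem.Str.len seg]
      | some last => acc ++ [last + PySem.Str.len seg]) acc
    = (segs.foldl (fun st seg =>
        let total := st.1 + PySem.Str.len seg
        (total, st.2 ++ [total])) (t, acc)).2 := by
  induction segs with
  | nil => intro acc t _; simp
  | cons seg rest ih =>
    intro acc t h
    simp only [List.foldl]
    cases hl : acc.getLast? with
    | none =>
      have ht : t = 0 := by simp [hl] at h; omega
      subst ht
      simp only [zero_add]
      exact ih (acc ++ [PySem.Str.len seg]) (PySem.Str.len seg)
        (by simp [List.getLast?_append])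
    | some lst =>
      have ht : t = lst := by simp [hl] at h; omega
      subst ht
      exact ih (acc ++ [t + PySem.Str.len seg]) (t + PySem.Str.len seg)
        (by simp [List.getLast?_append])

-- the ends list is sorted (nondecreasing) and bounded by the running total
theorem pv_build_sorted (segs : List String) :
    ∀ (acc : List Int) (t : Int), acc.Pairwise (· ≤ ·) → (∀ x ∈ acc, x ≤ t) →
    (segs.foldl (fun st seg =>
        let total := st.1 + PySem.Str.len seg
        (total, st.2 ++ [total])) (t, acc)).2.Pairwise (· ≤ ·)
    ∧ ∀ x ∈ (segs.foldl (fun st seg =>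
        let total := st.1 + PySem.Str.len seg
        (total, st.2 ++ [total])) (t, acc)).2,
      x ≤ (segs.foldl (fun st seg =>
        let total := st.1 + PySem.Str.len seg
        (total, st.2 ++ [total])) (t, acc)).1 := by
  induction segs with
  | nil => intro acc t hp hb; exact ⟨hp, hb⟩
  | cons seg rest ih =>
    intro acc t hp hb
    simp only [List.foldl]
    have hlen : PySem.Str.len seg = (seg.length : Int) := by
      simp [PySem.Str.len_eq]
    refine ih (acc ++ [t + PySem.Str.len seg]) (t + PySem.Str.len seg) ?_ ?_
    · simp only [List.pairwise_append]
      refine ⟨hp, by simp, ?_⟩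
      intro a ha b hb'
      simp only [List.mem_singleton] at hb'; subst hb'
      have := hb a ha; omega
    · intro x hx
      simp at hx
      rcases hx with hx | hx
      · have := hb x hx; omega
      · omega

-- A's scan equals "first element > start_char decides"
theorem pv_scanA_eq_find (ends : List Int) (s en : Int) :
    pvScanA ends s en = match ends.find? (fun e => decide (s < e)) with
      | none => true
      | some e => decide (en ≤ e) := by
  induction ends with
  | nil => simp [pvScanA]
  | cons e rest ih =>
    by_cases hse : s ≥ e
    · have : decide (s < e) = false := by simp; omega
      simp [pvScanA, hse, List.find?, this, ih]
    · have hlt : decide (s < e) = true := by simp; omega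
      simp only [pvScanA, if_neg hse, List.find?, hlt]
      by_cases hen : en ≤ e
      · simp [hen]; omega
      · have h1 : ¬ (s ≤ e ∧ en ≤ e) := by omega
        have h2 : en > e := by omega
        simp [h1, h2]

-- binary search returns the first index with s < ends[idx], given sortedness and invariant
theorem pv_bsearch_spec (ends : List Int) (s : Int)
    (hsort : ends.Pairwise (· ≤ ·)) :
    ∀ (lo hi : Nat), lo ≤ hi → hi ≤ ends.length →
    (∀ i, i < lo → ends.getD i 0 ≤ s) →
    (∀ i, hi ≤ i → i < ends.length → s < ends.getD i 0) →
    (∀ i, i < pvBsearch ends s lo hi → ends.getD i 0 ≤ s)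
    ∧ pvBsearch ends s lo hi ≤ ends.length
    ∧ (pvBsearch ends s lo hi < ends.length → s < ends.getD (pvBsearch ends s lo hi) 0) := by
  have hmono : ∀ i j, i ≤ j → j < ends.length → ends.getD i 0 ≤ ends.getD j 0 := by
    intro i j hij hj
    rcases Nat.eq_or_lt_of_le hij with h | h
    · subst h; exact le_refl _
    · rw [List.getD_eq_getElem ends 0 (lt_of_le_of_lt hij hj), List.getD_eq_getElem ends 0 hj]
      exact List.pairwise_iff_getElem.mp hsort i j _ _ h
  intro lo hi
  induction lo, hi using pvBsearch.induct ends s with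
  | case1 lo hi h mid hle ih =>
    intro _ hhi hlo hup
    rw [pvBsearch, dif_pos h]
    simp only [show (lo + hi) / 2 = mid from rfl, if_pos hle]
    refine ih (by omega) hhi ?_ hup
    intro i hi'
    have : i ≤ mid := by omega
    have hmlt : mid < ends.length := by omega
    exact le_trans (hmono i mid this hmlt) hle
  | case2 lo hi h mid hle ih =>
    intro _ hhi hlo hup
    rw [pvBsearch, dif_pos h]
    simp only [show (lo + hi) / 2 = mid from rfl, if_neg hle]
    refine ih (by omega) (by omega) hlo ?_
    intro i hmi hil
    have hmlt : mid < ends.length := by omega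
    calc s < ends.getD mid 0 := by omega
      _ ≤ ends.getD i 0 := hmono mid i hmi hil
  | case3 lo hi h =>
    intro hlh hhi hlo hup
    rw [pvBsearch, dif_neg h]
    have : lo = hi := by omega
    subst this
    exact ⟨hlo, hhi, fun hl => hup lo (le_refl _) hl⟩

-- find? at the first index satisfying p
theorem pv_find_at_index (l : List Int) (p : Int → Bool) :
    ∀ (r : Nat), r ≤ l.length → (∀ i, i < r → p (l.getD i 0) = false) →
    (r = l.length → l.find? p = none)
    ∧ (∀ h : r < l.length, p (l.getD r 0) = true → l.find? p = some (l.getD r 0)) := by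
  induction l with
  | nil => intro r hr _; simp at hr; simp [hr]
  | cons a tl ih =>
    intro r hr hbefore
    cases r with
    | zero =>
      constructor
      · intro h; simp at h
      · intro _ hp
        simp only [List.getD] at hp ⊢
        simp at hp ⊢
        simp [hp]
    | succ r' =>
      have hpa : p a = false := by
        have := hbefore 0 (Nat.succ_pos r'); simpa using this
      have hrec := ih r' (by simpa using hr)
        (fun i hi => by have := hbefore (i + 1) (by omega); simpa using this)
      constructor
      · intro h
        simp only [List.find?, hpa]
        exact hrec.1 (by simpa using h)
      · intro h hp
        simp only [List.find?, hpa]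
        have h' : r' < tl.length := by simpa using h
        have := hrec.2 h' (by simpa using hp)
        simpa using this

-- ===== VERDICT (by name: the statement is the Claim_ definition above) =====
theorem check_span_is_valid_spec : Claim_equal_check_span_is_valid := by
  intro segs s en _
  unfold Spec_check_span_is_valid check_span_is_valid check_span_is_valid_alt
  simp only []
  -- identify the two ends tables
  have hbuild := pv_build_eq segs [] 0 (by simp)
  rw [hbuild]
  set ends := (pvBuildEnds segs).2 with hends
  have hends' : (segs.foldl (fun st seg =>
        let total := st.1 + PySem.Str.len seg
        (total, st.2 ++ [total])) (0, [])).2 = ends := rfl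
  rw [hends']
  -- sortedness
  have hsorted : ends.Pairwise (· ≤ ·) :=
    (pv_build_sorted segs [] 0 (by simp) (by simp)).1
  -- binary search result
  set r := pvBsearch ends s 0 ends.length with hr
  have hspec := pv_bsearch_spec ends s hsorted 0 ends.length (Nat.zero_le _) (le_refl _)
    (by intro i hi; omega) (by intro i hi hil; omega)
  rw [← hr] at hspec
  obtain ⟨hbelow, hle, habove⟩ := hspec
  -- relate A's scan to find?, and find? to r
  rw [pv_scanA_eq_find]
  have hfind := pv_find_at_index ends (fun e => decide (s < e)) r hle
    (fun i hi => by simp; exact hbelow i hi)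
  by_cases hcase : r = ends.length
  · rw [hfind.1 hcase, if_pos hcase]
  · have hlt : r < ends.length := lt_of_le_of_ne hle hcase
    rw [hfind.2 hlt (by simp; exact habove hlt), if_neg hcase]
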